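-- pv_equiv track=rewrite | github.com/paul-tqh-nguyen/one_off_code | twitter_sentiment_analysis/string_processing_utilities.py | _word_string_minimized_for_search
-- ===== SOURCE A (Python) =====
-- UNIQUE_BOGUS_RESULT_IDENTIFIER = (lambda x: x)
--
-- VOWELS = {'a','e','i','o','u'}
--
-- NUMERIC_CHARACTERS = {'0', '1', '2', '3', '4', '5', '6', '7', '8', '9'}
--
-- def _word_string_minimized_for_search(word_string: str) -> str:
--     word_string_minimized_for_search = ''
--     most_recent_duplicated_vowel = UNIQUE_BOGUS_RESULT_IDENTIFIER
--     previous_character = UNIQUE_BOGUS_RESULT_IDENTIFIER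
--     vowels_likely_to_have_duplicates = {'e','o'}
--     for character in word_string:
--         if character in NUMERIC_CHARACTERS or previous_character != character:
--             word_string_minimized_for_search += character
--             previous_character = character
--             most_recent_duplicated_vowel = UNIQUE_BOGUS_RESULT_IDENTIFIER
--         elif character in VOWELS and most_recent_duplicated_vowel != character:
--             word_string_minimized_for_search += character
--             previous_character = character
--             most_recent_duplicated_vowel = character
--     return word_string_minimized_for_search
-- ===== SOURCE B (Python) =====
-- VOWELS = {'a','e','i','o','u'}
-- NUMERIC_CHARACTERS = {'0', '1', '2', '3', '4', '5', '6', '7', '8', '9'}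
--
-- def _word_string_minimized_for_search(word_string: str) -> str:
--     # run-based pass: split into maximal runs of equal chars and emit per run
--     pieces = []
--     i = 0
--     n = len(word_string)
--     while i < n:
--         ch = word_string[i]
--         j = i
--         while j < n and word_string[j] == ch:
--             j += 1
--         run = j - i
--         if ch in NUMERIC_CHARACTERS:
--             pieces.append(ch * run)
--         elif ch in VOWELS:
--             pieces.append(ch * min(run, 2))
--         else:
--             pieces.append(ch)
--         i = j
--     return ''.join(pieces)
-- ===== Notes on version B (the rewrite author's own statement) =====
-- stated objective: alternative
-- what changed: Replaced the previous-character/most-recent-duplicated-vowel state machine with a run-based pass: split the string into maximal runs of equal characters and emit the whole run for digits, at most two copies for vowels, one copy otherwise.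
import Mathlib
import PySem

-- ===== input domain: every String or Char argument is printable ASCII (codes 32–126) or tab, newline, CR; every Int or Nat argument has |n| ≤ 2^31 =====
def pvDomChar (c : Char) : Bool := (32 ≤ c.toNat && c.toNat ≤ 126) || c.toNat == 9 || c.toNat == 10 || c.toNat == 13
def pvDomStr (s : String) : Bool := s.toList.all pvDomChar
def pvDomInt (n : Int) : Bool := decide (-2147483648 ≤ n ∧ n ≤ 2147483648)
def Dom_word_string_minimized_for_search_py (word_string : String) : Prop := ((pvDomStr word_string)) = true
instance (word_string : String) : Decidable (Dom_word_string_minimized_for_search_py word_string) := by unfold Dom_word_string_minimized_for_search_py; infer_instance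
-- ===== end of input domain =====

-- B replaces A's previous-character / most-recent-duplicated-vowel state machine by a
-- run-based pass (maximal runs of equal chars; digits kept whole, vowels capped at 2,
-- the rest collapsed to 1); alternative decomposition, same asymptotic cost.

-- ===== PORT A =====
def pvNumeric : List Char := ['0','1','2','3','4','5','6','7','8','9']
def pvVowels : List Char := ['a','e','i','o','u']

-- literal port of A's loop: state = (accumulated string, previous_character,
-- most_recent_duplicated_vowel); the Python BOGUS sentinel (never equal to a char) is `none`.
def word_string_minimized_for_search_py (word_string : String) : String :=
  String.ofList
    (word_string.toList.foldl
      (fun (st : List Char × Option Char × Option Char) (character : Char) =>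
        let (acc, p, m) := st
        if character ∈ pvNumeric ∨ p ≠ some character then
          (acc ++ [character], some character, none)
        else if character ∈ pvVowels ∧ m ≠ some character then
          (acc ++ [character], some character, some character)
        else (acc, p, m))
      ([], none, none)).1

-- ===== PORT B =====
-- emit for one maximal run of n copies of c
def pvEmitRun (c : Char) (n : Nat) : List Char :=
  if c ∈ pvNumeric then List.replicate n c
  else if c ∈ pvVowels then List.replicate (min n 2) c
  else [c]

-- split off the leading maximal run, emit it, recurse (B's outer while loop)
def pvRuns : List Char → List Char
  | [] => []
  | c :: cs =>
    pvEmitRun c (1 + (cs.takeWhile (· == c)).length) ++ pvRuns (cs.dropWhile (· == c))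
termination_by l => l.length
decreasing_by
  simpa using Nat.lt_succ_of_le (List.length_dropWhile_le _ _)

def word_string_minimized_for_search_py_alt (word_string : String) : String :=
  String.ofList (pvRuns word_string.toList)

-- ===== PRECONDITION & SPEC =====
def Spec_word_string_minimized_for_search_py (word_string : String) (out : String) : Prop := out = word_string_minimized_for_search_py_alt word_string
instance (word_string : String) (out : String) : Decidable (Spec_word_string_minimized_for_search_py word_string out) := by unfold Spec_word_string_minimized_for_search_py; infer_instance

-- ===== CLAIM (what is proved, stated in full; the proofs are below) =====
def Claim_equal_word_string_minimized_for_search_py : Prop := ∀ (word_string : String), Dom_word_string_minimized_for_search_py word_string → Spec_word_string_minimized_for_search_py word_string (word_string_minimized_for_search_py word_string)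

-- ===== LEMMAS AND PROOFS =====

-- A's loop without the accumulator
def Aloop : List Char → Option Char → Option Char → List Char
  | [], _, _ => []
  | c :: cs, p, m =>
    if c ∈ pvNumeric ∨ p ≠ some c then c :: Aloop cs (some c) none
    else if c ∈ pvVowels ∧ m ≠ some c then c :: Aloop cs (some c) (some c)
    else Aloop cs p m

lemma foldl_eq_Aloop (l : List Char) (acc : List Char) (p m : Option Char) :
    (l.foldl
      (fun (st : List Char × Option Char × Option Char) (character : Char) =>
        let (acc, p, m) := st
        if character ∈ pvNumeric ∨ p ≠ some character then
          (acc ++ [character], some character, none)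
        else if character ∈ pvVowels ∧ m ≠ some character then
          (acc ++ [character], some character, some character)
        else (acc, p, m))
      (acc, p, m)).1 = acc ++ Aloop l p m := by
  induction l generalizing acc p m with
  | nil => simp [Aloop]
  | cons c cs ih =>
    simp only [List.foldl_cons, Aloop]
    split_ifs with h1 h2 <;> simp [ih]

-- dropping phase: state (some c, m) where the drop branch applies to copies of c
lemma Aloop_drop (cs : List Char) (c : Char) (m : Option Char)
    (hn : c ∉ pvNumeric) (hv : ¬(c ∈ pvVowels ∧ m ≠ some c)) :
    Aloop cs (some c) m = Aloop (cs.dropWhile (· == c)) (some c) m := by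
  induction cs with
  | nil => simp
  | cons d ds ih =>
    by_cases hd : d = c
    · subst hd
      rw [Aloop, if_neg (by simp [hn]), if_neg hv]
      simpa using ih
    · rw [List.dropWhile_cons_of_neg (by simpa using hd)]

-- digit run: every copy appended
lemma Aloop_digit (cs : List Char) (c : Char) (hn : c ∈ pvNumeric) :
    Aloop cs (some c) none =
      cs.takeWhile (· == c) ++ Aloop (cs.dropWhile (· == c)) (some c) none := by
  induction cs with
  | nil => simp
  | cons d ds ih =>
    by_cases hd : d = c
    · subst hd
      rw [Aloop, if_pos (Or.inl hn), List.takeWhile_cons_of_pos (by simp),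
        List.dropWhile_cons_of_pos (by simp)]
      simpa using ih
    · rw [List.takeWhile_cons_of_neg (by simpa using hd),
        List.dropWhile_cons_of_neg (by simpa using hd)]
      simp

lemma takeWhile_eq_replicate (cs : List Char) (c : Char) :
    cs.takeWhile (· == c) = List.replicate (cs.takeWhile (· == c)).length c := by
  induction cs with
  | nil => simp
  | cons d ds ih =>
    by_cases hd : d = c
    · subst hd
      rw [List.takeWhile_cons_of_pos (by simp)]
      simp [List.replicate_succ, ← ih]
    · rw [List.takeWhile_cons_of_neg (by simpa using hd)]
      simp

lemma head_dropWhile_ne (cs : List Char) (c : Char) (d : Char)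
    (hd : d ∈ (cs.dropWhile (· == c)).head?) : d ≠ c := by
  have := List.head?_dropWhile_not (p := (· == c)) (l := cs)
  rw [hd] at this
  simpa using this

-- main run lemma: from any state whose previous char differs from the head,
-- A's loop produces B's run-based output
lemma Aloop_eq_pvRuns (l : List Char) (p m : Option Char)
    (h : ∀ c ∈ l.head?, p ≠ some c) : Aloop l p m = pvRuns l := by
  induction l using pvRuns.induct generalizing p m with
  | case1 => simp [Aloop, pvRuns]
  | case2 c cs ih =>
    have hp : p ≠ some c := h c (by simp)
    have hnext : ∀ d ∈ (cs.dropWhile (· == c)).head?, some c ≠ some d := by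
      intro d hd
      simpa [eq_comm] using head_dropWhile_ne cs c d hd
    rw [Aloop, if_pos (Or.inr hp), pvRuns]
    by_cases hn : c ∈ pvNumeric
    · rw [Aloop_digit cs c hn, ih _ _ hnext, pvEmitRun, if_pos hn]
      conv_lhs => rw [takeWhile_eq_replicate cs c]
      rw [Nat.add_comm 1, List.replicate_succ]
      simp
    · by_cases hv : c ∈ pvVowels
      · -- vowel run: a second copy is kept iff the run has length ≥ 2
        rw [pvEmitRun, if_neg hn, if_pos hv]
        cases cs with
        | nil => simp [Aloop, pvRuns]
        | cons d ds =>
          by_cases hd : d = c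
          · subst hd
            rw [List.takeWhile_cons_of_pos (by simp),
              List.dropWhile_cons_of_pos (by simp)]
            rw [List.dropWhile_cons_of_pos (p := (· == d)) (by simp)] at hnext ih
            rw [Aloop, if_neg (by simp [hn]), if_pos ⟨hv, by simp⟩,
              Aloop_drop ds d (some d) hn (by simp), ih _ _ hnext]
            have hm : min (1 + ((ds.takeWhile (· == d)).length + 1)) 2 = 2 := by omega
            simp [hm, List.replicate_succ]
          · rw [List.takeWhile_cons_of_neg (by simpa using hd),
              List.dropWhile_cons_of_neg (by simpa using hd)]
            rw [List.dropWhile_cons_of_neg (p := (· == c)) (by simpa using hd)] at hnext ih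
            rw [ih _ _ hnext]
            simp
      · -- consonant run: collapsed to one copy
        rw [pvEmitRun, if_neg hn, if_neg hv,
          Aloop_drop cs c none hn (by simp [hv]), ih _ _ hnext]
        simp

-- ===== VERDICT (by name: the statement is the Claim_ definition above) =====
theorem word_string_minimized_for_search_py_spec : Claim_equal_word_string_minimized_for_search_py := by
  intro s _
  unfold Spec_word_string_minimized_for_search_py
  unfold word_string_minimized_for_search_py word_string_minimized_for_search_py_alt
  rw [foldl_eq_Aloop, Aloop_eq_pvRuns _ _ _ (by intro c _; simp)]
  simp
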